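-- pv_equiv track=rewrite | github.com/tomasvanagas/prime-research | experiments/circuit_complexity/approx_degree.py | compute_degree_distribution
-- ===== SOURCE A (Python) =====
-- def compute_degree_distribution(anf, N, p):
--     """Compute the distribution of ANF coefficients by degree."""
--     degree_counts = {}
--     degree_nonzero = {}
--
--     for S in range(2**N):
--         deg = bin(S).count('1')
--         if deg not in degree_counts:
--             degree_counts[deg] = 0
--             degree_nonzero[deg] = 0
--         degree_counts[deg] += 1
--         if anf[S] % p != 0:
--             degree_nonzero[deg] += 1
--
--     return degree_counts, degree_nonzero
-- ===== SOURCE B (Python) =====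
-- def compute_degree_distribution(anf, N, p):
--     """Compute the distribution of ANF coefficients by degree."""
--     # degree_counts in closed form: binomial row C(N, d) via the multiplicative recurrence
--     degree_counts = {}
--     c = 1
--     for d in range(N + 1):
--         degree_counts[d] = c
--         c = c * (N - d) // (d + 1)
--     # zero-filled nonzero table, then one counting pass
--     degree_nonzero = {d: 0 for d in range(N + 1)}
--     for S in range(2 ** N):
--         if anf[S] % p != 0:
--             degree_nonzero[bin(S).count('1')] += 1
--     return degree_counts, degree_nonzero
-- ===== Notes on version B (the rewrite author's own statement) =====
-- stated objective: alternative
-- what changed: degree_counts is computed in closed form as the binomial row C(N,d) via the multiplicative recurrence c = c*(N-d)//(d+1) instead of being counted incrementally, and degree_nonzero is zero-initialised for every degree 0..N and then filled by one separate counting pass, replacing A's interleaved lazily-keyed dual accumulation.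
import Mathlib
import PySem

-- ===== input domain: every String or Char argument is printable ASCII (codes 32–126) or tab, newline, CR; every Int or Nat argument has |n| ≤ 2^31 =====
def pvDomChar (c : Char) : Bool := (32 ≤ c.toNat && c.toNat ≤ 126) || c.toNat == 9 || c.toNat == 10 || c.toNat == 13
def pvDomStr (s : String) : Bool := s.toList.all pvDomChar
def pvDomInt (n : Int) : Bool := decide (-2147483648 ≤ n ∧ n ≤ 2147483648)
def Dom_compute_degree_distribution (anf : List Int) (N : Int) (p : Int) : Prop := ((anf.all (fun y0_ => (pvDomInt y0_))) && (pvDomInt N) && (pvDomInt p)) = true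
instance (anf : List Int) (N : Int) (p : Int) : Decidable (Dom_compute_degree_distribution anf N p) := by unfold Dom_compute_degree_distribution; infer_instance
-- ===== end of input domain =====

-- B replaces A's interleaved lazily-keyed dict accumulation by a closed-form binomial row C(N,d)
-- plus a zero-filled table and one counting pass (objective: alternative decomposition).


-- ===== PORT A =====
def compute_degree_distribution (anf : List Int) (N : Int) (p : Int) : (List (Int × Int)) × (List (Int × Int)) :=
  -- for S in range(2**N); 2**N is no int for N < 0 (TypeError), excluded by Pre_ (the toNat is a totality guard)
  let loop := (PySem.List.pyRange 0 ((2:Int) ^ N.toNat) 1).foldl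
    (fun (st : PySem.Dict Int Int × PySem.Dict Int Int) S =>
      let deg : Int := ((PySem.Int.bitCount S : Nat) : Int)   -- bin(S).count('1')
      -- if deg not in degree_counts: degree_counts[deg] = 0; degree_nonzero[deg] = 0
      let st := if st.1.contains deg then st else (st.1.insert deg 0, st.2.insert deg 0)
      let dc := st.1.modify deg 0 (· + 1)                      -- degree_counts[deg] += 1
      let dn := match PySem.List.pyGet? anf S with             -- anf[S]: none = IndexError, excluded by Pre_
        | some v => if PySem.Int.mod v p ≠ 0 then st.2.modify deg 0 (· + 1) else st.2
        | none => st.2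
      (dc, dn))
    (PySem.Dict.empty, PySem.Dict.empty)
  (loop.1.items, loop.2.items)

-- ===== PORT B =====
def compute_degree_distribution_alt (anf : List Int) (N : Int) (p : Int) : (List (Int × Int)) × (List (Int × Int)) :=
  -- degree_counts = binomial row via c = c * (N - d) // (d + 1)
  let dcc := (PySem.List.pyRange 0 (N + 1) 1).foldl
    (fun (st : PySem.Dict Int Int × Int) d => (st.1.insert d st.2, PySem.Int.floordiv (st.2 * (N - d)) (d + 1)))
    (PySem.Dict.empty, 1)
  -- degree_nonzero = {d: 0 for d in range(N + 1)}
  let dn0 := (PySem.List.pyRange 0 (N + 1) 1).foldl (fun (dn : PySem.Dict Int Int) d => dn.insert d 0) PySem.Dict.empty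
  -- one counting pass (degree_nonzero[k] += 1: the key is always present on Pre_, so modify is exact)
  let dn := (PySem.List.pyRange 0 ((2:Int) ^ N.toNat) 1).foldl
    (fun (dn : PySem.Dict Int Int) S =>
      match PySem.List.pyGet? anf S with
      | some v => if PySem.Int.mod v p ≠ 0 then dn.modify ((PySem.Int.bitCount S : Nat) : Int) 0 (· + 1) else dn
      | none => dn)
    dn0
  (dcc.1.items, dn.items)

-- ===== PRECONDITION & SPEC =====
-- Pre_ = exactly where the Python A returns: N ≥ 0 (else 2**N is a float and range raises TypeError),
-- p ≠ 0 (else ZeroDivisionError at anf[0] % p), and len(anf) ≥ 2**N (else IndexError at anf[S]).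
def Pre_compute_degree_distribution (anf : List Int) (N : Int) (p : Int) : Prop :=
  0 ≤ N ∧ p ≠ 0 ∧ (2:Int) ^ N.toNat ≤ anf.length
instance (anf : List Int) (N : Int) (p : Int) : Decidable (Pre_compute_degree_distribution anf N p) := by
  unfold Pre_compute_degree_distribution; infer_instance
def pvWitness_compute_degree_distribution : List Int × Int × Int := ([1, 2], 1, 2)
def Spec_compute_degree_distribution (anf : List Int) (N : Int) (p : Int) (out : (List (Int × Int)) × (List (Int × Int))) : Prop := out = compute_degree_distribution_alt anf N p
instance (anf : List Int) (N : Int) (p : Int) (out : (List (Int × Int)) × (List (Int × Int))) : Decidable (Spec_compute_degree_distribution anf N p out) := by unfold Spec_compute_degree_distribution; infer_instance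

-- ===== CLAIM (what is proved, stated in full; the proofs are below) =====
def Claim_equal_compute_degree_distribution : Prop := ∀ (anf : List Int) (N : Int) (p : Int), Dom_compute_degree_distribution anf N p → Pre_compute_degree_distribution anf N p → Spec_compute_degree_distribution anf N p (compute_degree_distribution anf N p)

-- ===== LEMMAS AND PROOFS =====

-- popcount of a natural number, as the ports compute it
def pvBC (s : Nat) : Nat := PySem.Int.bitCount (s : Int)

-- the dict {0: f 0, 1: f 1, …, k-1: f (k-1)} in that key order
def pvDictOf (k : Nat) (f : Nat → Int) : PySem.Dict Int Int :=
  PySem.Dict.mk ((List.range' 0 k).map fun d : Nat => ((d : Int), f d))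

-- the test "anf[S] % p != 0" as both ports evaluate it (false where anf[S] would raise)
def pvCond (anf : List Int) (p : Int) (s : Nat) : Bool :=
  match PySem.List.pyGet? anf (s : Int) with
  | some v => decide (PySem.Int.mod v p ≠ 0)
  | none => false

-- ---- pvBC facts ----
lemma pvBC_zero : pvBC 0 = 0 := by decide

lemma pvBC_succ (m : Nat) (h : 0 < m) : pvBC m = m % 2 + pvBC (m / 2) := by
  simpa [pvBC] using PySem.Int.bitCount_natCast h

lemma pvBC_le (b m : Nat) (h : m < 2 ^ b) : pvBC m ≤ b := by
  induction b generalizing m with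
  | zero => interval_cases m; decide
  | succ b ih =>
    rcases Nat.eq_zero_or_pos m with rfl | hm
    · simp [pvBC_zero]
    · rw [pvBC_succ m hm]
      have h2 : m / 2 < 2 ^ b := by omega
      have := ih (m / 2) h2
      have : m % 2 ≤ 1 := by omega
      omega

lemma pvBC_eq_of_max (b m : Nat) (h : m < 2 ^ b) (he : pvBC m = b) : m = 2 ^ b - 1 := by
  induction b generalizing m with
  | zero => interval_cases m; rfl
  | succ b ih =>
    have hm : 0 < m := by
      rcases Nat.eq_zero_or_pos m with rfl | hm
      · simp [pvBC_zero] at he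
      · exact hm
    rw [pvBC_succ m hm] at he
    have h2 : m / 2 < 2 ^ b := by omega
    have hle := pvBC_le b (m / 2) h2
    have hmod : m % 2 ≤ 1 := by omega
    have h1 : m % 2 = 1 ∧ pvBC (m / 2) = b := by omega
    have := ih (m / 2) h2 h1.2
    have hb : 0 < 2 ^ b := Nat.pow_pos (by norm_num)
    omega

lemma pvBC_pow_sub_one (b : Nat) : pvBC (2 ^ b - 1) = b := by
  induction b with
  | zero => decide
  | succ b ih =>
    have hb : 0 < 2 ^ b := Nat.pow_pos (by norm_num)
    have hm : 0 < 2 ^ (b + 1) - 1 := by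
      have : (2:Nat) ^ (b+1) = 2 * 2 ^ b := by ring
      omega
    rw [pvBC_succ _ hm]
    have h2 : (2 ^ (b + 1) - 1) / 2 = 2 ^ b - 1 := by
      have : (2:Nat) ^ (b+1) = 2 * 2 ^ b := by ring
      omega
    have h1 : (2 ^ (b + 1) - 1) % 2 = 1 := by
      have : (2:Nat) ^ (b+1) = 2 * 2 ^ b := by ring
      omega
    rw [h1, h2, ih]; omega

lemma pvBC_add_pow (n : Nat) : ∀ s : Nat, s < 2 ^ n → pvBC (2 ^ n + s) = pvBC s + 1 := by
  induction n with
  | zero => intro s hs; interval_cases s; decide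
  | succ n ih =>
    intro s hs
    have hpos : 0 < 2 ^ (n + 1) + s := by positivity
    rw [pvBC_succ _ hpos]
    have hp : (2:Nat) ^ (n+1) = 2 * 2 ^ n := by ring
    have hmod : (2 ^ (n + 1) + s) % 2 = s % 2 := by omega
    have hdiv : (2 ^ (n + 1) + s) / 2 = 2 ^ n + s / 2 := by omega
    rw [hmod, hdiv, ih (s / 2) (by omega)]
    rcases Nat.eq_zero_or_pos s with rfl | hspos
    · simp [pvBC_zero]
    · rw [pvBC_succ s hspos]; omega

-- ---- log2 facts ----
lemma pv_log2_eq (m K : Nat) (h1 : 2 ^ K ≤ m) (h2 : m < 2 ^ (K + 1)) : m.log2 = K := by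
  have hm : m ≠ 0 := by
    have : 0 < 2 ^ K := Nat.pow_pos (by norm_num)
    omega
  have hl1 := Nat.log2_self_le hm
  have hl2 := @Nat.lt_log2_self m
  rcases Nat.lt_trichotomy m.log2 K with h | h | h
  · have : 2 ^ (m.log2 + 1) ≤ 2 ^ K := Nat.pow_le_pow_right (by norm_num) (by omega)
    omega
  · exact h
  · have : 2 ^ (K + 1) ≤ 2 ^ m.log2 := Nat.pow_le_pow_right (by norm_num) (by omega)
    omega

-- ---- pvDictOf facts ----
lemma pvDictOf_zero (f : Nat → Int) : pvDictOf 0 f = PySem.Dict.empty := rfl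

lemma pv_get?_seg (a k : Nat) (f : Nat → Int) (e : Nat) :
    (PySem.Dict.mk ((List.range' a k).map fun d : Nat => ((d : Int), f d))).get? (e : Int)
      = if a ≤ e ∧ e < a + k then some (f e) else none := by
  induction k generalizing a with
  | zero =>
    have : ¬ (a ≤ e ∧ e < a + 0) := by omega
    simp [PySem.Dict.get?]
  | succ k ih =>
    rw [List.range'_succ]
    simp only [List.map_cons, PySem.Dict.get?_mk_cons]
    by_cases he : a = e
    · subst he
      have : a ≤ a ∧ a < a + (k + 1) := by omega
      simp [this]
    · have : ((a : Int) == (e : Int)) = false := by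
        simp; omega
      rw [this]
      simp only [Bool.false_eq_true, if_false]
      rw [ih (a + 1)]
      by_cases h1 : a + 1 ≤ e ∧ e < a + 1 + k
      · rw [if_pos h1, if_pos (by omega)]
      · rw [if_neg h1, if_neg (by omega)]

lemma pv_get?_dictOf (k : Nat) (f : Nat → Int) (e : Nat) :
    (pvDictOf k f).get? (e : Int) = if e < k then some (f e) else none := by
  rw [pvDictOf, pv_get?_seg]
  congr 1
  simp

lemma pv_contains_dictOf (k : Nat) (f : Nat → Int) (e : Nat) :
    (pvDictOf k f).contains (e : Int) = decide (e < k) := by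
  rw [PySem.Dict.contains_eq_isSome_get?, pv_get?_dictOf]
  by_cases h : e < k <;> simp [h]

lemma pv_getD_dictOf (k : Nat) (f : Nat → Int) (e : Nat) (he : e < k) (d0 : Int) :
    (pvDictOf k f).getD (e : Int) d0 = f e := by
  rw [PySem.Dict.getD_eq_get?_getD, pv_get?_dictOf, if_pos he, Option.getD_some]

lemma pvDictOf_congr (k : Nat) (f g : Nat → Int) (h : ∀ d < k, f d = g d) :
    pvDictOf k f = pvDictOf k g := by
  unfold pvDictOf
  congr 1
  apply List.map_congr_left
  intro d hd
  rw [List.mem_range'_1] at hd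
  rw [h d (by omega)]

lemma pvDictOf_insert_mem (k : Nat) (f : Nat → Int) (e : Nat) (he : e < k) (v : Int) :
    (pvDictOf k f).insert (e : Int) v = pvDictOf k (fun d => if d = e then v else f d) := by
  apply PySem.Dict.ext
  rw [PySem.Dict.items_insert_of_contains _ _ (by rw [pv_contains_dictOf]; simpa)]
  show ((List.range' 0 k).map _).map _ = _
  rw [List.map_map]
  apply List.map_congr_left
  intro d hd
  rw [List.mem_range'_1] at hd
  by_cases hde : d = e
  · subst hde; simp
  · have hb : ((d : Int) == (e : Int)) = false := by simp; omega
    simp [hde]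

lemma pvDictOf_snoc (k : Nat) (f : Nat → Int) :
    (pvDictOf k f).insert (k : Int) (f k) = pvDictOf (k + 1) f := by
  apply PySem.Dict.ext
  rw [PySem.Dict.items_insert_of_not_contains _ _ (by rw [pv_contains_dictOf]; simp)]
  simp only [pvDictOf]
  rw [List.range'_concat]
  simp

-- ---- characterisation of A's loop ----
-- the fold body of port A, over Nat indices
def pvStepA (anf : List Int) (p : Int) (st : PySem.Dict Int Int × PySem.Dict Int Int) (s : Nat) :
    PySem.Dict Int Int × PySem.Dict Int Int :=
  let deg : Int := ((PySem.Int.bitCount (s : Int) : Nat) : Int)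
  let st := if st.1.contains deg then st else (st.1.insert deg 0, st.2.insert deg 0)
  let dc := st.1.modify deg 0 (· + 1)
  let dn := match PySem.List.pyGet? anf (s : Int) with
    | some v => if PySem.Int.mod v p ≠ 0 then st.2.modify deg 0 (· + 1) else st.2
    | none => st.2
  (dc, dn)

-- one A-step on a dict pair whose keys are 0..K-1, existing-key case
lemma pvStepA_mem (anf : List Int) (p : Int) (K : Nat) (f g : Nat → Int) (m : Nat) (h : pvBC m < K) :
    pvStepA anf p (pvDictOf K f, pvDictOf K g) m
      = (pvDictOf K (fun d => if d = pvBC m then f d + 1 else f d),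
         pvDictOf K (fun d => if pvCond anf p m ∧ d = pvBC m then g d + 1 else g d)) := by
  unfold pvStepA
  have hbc : ((PySem.Int.bitCount ((m : Nat) : Int) : Nat) : Int) = ((pvBC m : Nat) : Int) := rfl
  simp only [hbc, pv_contains_dictOf K f (pvBC m), h, decide_true, if_true]
  refine Prod.ext ?_ ?_
  · show (pvDictOf K f).modify ((pvBC m : Nat) : Int) 0 (· + 1) = _
    rw [PySem.Dict.modify, pv_getD_dictOf K f (pvBC m) h, pvDictOf_insert_mem K f (pvBC m) h]
    apply pvDictOf_congr; intro d hd
    by_cases hdk : d = pvBC m <;> simp [hdk]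
  · show (match PySem.List.pyGet? anf ((m : Nat) : Int) with
      | some v => if PySem.Int.mod v p ≠ 0 then (pvDictOf K g).modify ((pvBC m : Nat) : Int) 0 (· + 1) else pvDictOf K g
      | none => pvDictOf K g) = _
    rcases hget : PySem.List.pyGet? anf ((m : Nat) : Int) with _ | v
    · have hc : pvCond anf p m = false := by simp [pvCond, hget]
      simp only [hc]
      apply pvDictOf_congr; intro d hd; simp
    · by_cases hv : PySem.Int.mod v p ≠ 0
      · have hc : pvCond anf p m = true := by simp [pvCond, hget, hv]
        simp only [if_pos hv, hc]
        rw [PySem.Dict.modify, pv_getD_dictOf K g (pvBC m) h, pvDictOf_insert_mem K g (pvBC m) h]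
        apply pvDictOf_congr; intro d hd
        by_cases hdk : d = pvBC m <;> simp [hdk]
      · have hc : pvCond anf p m = false := by simp [pvCond, hget]; simpa using hv
        simp only [if_neg hv, hc]
        apply pvDictOf_congr; intro d hd; simp

-- one A-step, fresh-key case (pvBC m = K: the key is appended then bumped)
lemma pvStepA_fresh (anf : List Int) (p : Int) (K : Nat) (f g : Nat → Int) (m : Nat) (h : pvBC m = K) :
    pvStepA anf p (pvDictOf K f, pvDictOf K g) m
      = (pvDictOf (K + 1) (fun d => if d = K then 1 else f d),
         pvDictOf (K + 1) (fun d => if d = K then (if pvCond anf p m then 1 else 0) else g d)) := by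
  unfold pvStepA
  have hbc : ((PySem.Int.bitCount ((m : Nat) : Int) : Nat) : Int) = ((K : Nat) : Int) := by
    show ((pvBC m : Nat) : Int) = _
    rw [h]
  have hcon : (pvDictOf K f).contains ((K : Nat) : Int) = false := by
    rw [pv_contains_dictOf]; simp
  simp only [hbc, hcon, Bool.false_eq_true, if_false]
  have hf : pvDictOf K f = pvDictOf K (fun d => if d = K then (0:Int) else f d) := by
    apply pvDictOf_congr; intro d hd
    have hdk : d ≠ K := by omega
    simp [hdk]
  have hg : pvDictOf K g = pvDictOf K (fun d => if d = K then (0:Int) else g d) := by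
    apply pvDictOf_congr; intro d hd
    have hdk : d ≠ K := by omega
    simp [hdk]
  have hinsf : (pvDictOf K f).insert ((K : Nat) : Int) 0 = pvDictOf (K + 1) (fun d => if d = K then (0:Int) else f d) := by
    rw [hf]
    have := pvDictOf_snoc K (fun d => if d = K then (0:Int) else f d)
    simpa using this
  have hinsg : (pvDictOf K g).insert ((K : Nat) : Int) 0 = pvDictOf (K + 1) (fun d => if d = K then (0:Int) else g d) := by
    rw [hg]
    have := pvDictOf_snoc K (fun d => if d = K then (0:Int) else g d)
    simpa using this
  simp only [hinsf, hinsg]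
  refine Prod.ext ?_ ?_
  · show (pvDictOf (K + 1) _).modify ((K : Nat) : Int) 0 (· + 1) = _
    rw [PySem.Dict.modify, pv_getD_dictOf (K + 1) _ K (by omega), pvDictOf_insert_mem (K + 1) _ K (by omega)]
    apply pvDictOf_congr; intro d hd
    by_cases hdk : d = K <;> simp [hdk]
  · show (match PySem.List.pyGet? anf ((m : Nat) : Int) with
      | some v => if PySem.Int.mod v p ≠ 0 then (pvDictOf (K + 1) _).modify ((K : Nat) : Int) 0 (· + 1)
                  else pvDictOf (K + 1) _
      | none => pvDictOf (K + 1) _) = _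
    rcases hget : PySem.List.pyGet? anf ((m : Nat) : Int) with _ | v
    · have hc : pvCond anf p m = false := by simp [pvCond, hget]
      simp only [hc, Bool.false_eq_true, if_false]
    · by_cases hv : PySem.Int.mod v p ≠ 0
      · have hc : pvCond anf p m = true := by simp [pvCond, hget, hv]
        simp only [if_pos hv, hc, if_true]
        rw [PySem.Dict.modify, pv_getD_dictOf (K + 1) _ K (by omega), pvDictOf_insert_mem (K + 1) _ K (by omega)]
        apply pvDictOf_congr; intro d hd
        by_cases hdk : d = K <;> simp [hdk]
      · have hc : pvCond anf p m = false := by simp [pvCond, hget]; simpa using hv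
        simp only [if_neg hv, hc, Bool.false_eq_true, if_false]

def pvCntC (m d : Nat) : Int := ((List.range' 0 m).countP (fun S => pvBC S == d) : Int)
def pvCntZ (anf : List Int) (p : Int) (m d : Nat) : Int :=
  ((List.range' 0 m).countP (fun S => pvCond anf p S && (pvBC S == d)) : Int)

lemma pvA_loop (anf : List Int) (p : Int) (m : Nat) (hm : 1 ≤ m) :
    (List.range' 0 m).foldl (pvStepA anf p) (PySem.Dict.empty, PySem.Dict.empty)
      = (pvDictOf (m.log2 + 1) (pvCntC m), pvDictOf (m.log2 + 1) (pvCntZ anf p m)) := by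
  induction m, hm using Nat.le_induction with
  | base =>
    show List.foldl _ _ [0] = _
    rw [List.foldl_cons, List.foldl_nil]
    have he : (PySem.Dict.empty, PySem.Dict.empty)
        = (pvDictOf 0 (fun _ => (0:Int)), pvDictOf 0 (fun _ => (0:Int))) := rfl
    rw [he, pvStepA_fresh anf p 0 _ _ 0 pvBC_zero]
    have hl : Nat.log2 1 = 0 := rfl
    rw [hl]
    refine Prod.ext ?_ ?_
    · apply pvDictOf_congr; intro d hd
      have hd0 : d = 0 := by omega
      subst hd0
      simp [pvCntC, pvBC_zero]
    · apply pvDictOf_congr; intro d hd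
      have hd0 : d = 0 := by omega
      subst hd0
      cases hpc : pvCond anf p 0 <;> simp [pvCntZ, pvBC_zero, hpc]
  | succ m hm ih =>
    have hm0 : m ≠ 0 := by omega
    have h1 : 2 ^ m.log2 ≤ m := Nat.log2_self_le hm0
    have h2 : m < 2 ^ (m.log2 + 1) := Nat.lt_log2_self
    have hconcat : List.range' 0 (m + 1) = List.range' 0 m ++ [m] := by
      have h := @List.range'_concat 1 0 m
      simpa using h
    rw [hconcat, List.foldl_append, ih, List.foldl_cons, List.foldl_nil]
    by_cases hbc : pvBC m < m.log2 + 1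
    · rw [pvStepA_mem anf p (m.log2 + 1) _ _ m hbc]
      have hne : m + 1 ≠ 2 ^ (m.log2 + 1) := by
        intro hcontra
        have hmeq : m = 2 ^ (m.log2 + 1) - 1 := by omega
        have hbig := pvBC_pow_sub_one (m.log2 + 1)
        rw [← hmeq] at hbig
        omega
      have hlog : (m + 1).log2 = m.log2 := pv_log2_eq (m + 1) m.log2 (by omega) (by omega)
      rw [hlog]
      refine Prod.ext ?_ ?_
      · apply pvDictOf_congr; intro d hd
        simp only [pvCntC]
        rw [hconcat, List.countP_append]
        simp only [List.countP_cons, List.countP_nil]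
        by_cases hdm : d = pvBC m
        · subst hdm
          simp only [BEq.rfl]
          push_cast; ring
        · have hne2 : (pvBC m == d) = false := by simp; omega
          simp [hdm, hne2]
      · apply pvDictOf_congr; intro d hd
        simp only [pvCntZ]
        rw [hconcat, List.countP_append]
        simp only [List.countP_cons, List.countP_nil]
        by_cases hdm : d = pvBC m
        · subst hdm
          cases hpc : pvCond anf p m <;> simp
        · have hne2 : (pvBC m == d) = false := by simp; omega
          simp [hdm, hne2]
    · have hbc2 : pvBC m = m.log2 + 1 := le_antisymm (pvBC_le (m.log2 + 1) m h2) (by omega)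
      have hm2 : m = 2 ^ (m.log2 + 1) - 1 := pvBC_eq_of_max (m.log2 + 1) m h2 hbc2
      rw [pvStepA_fresh anf p (m.log2 + 1) _ _ m hbc2]
      have hlog : (m + 1).log2 = m.log2 + 1 := by
        have hpow : 0 < 2 ^ (m.log2 + 1) := by positivity
        have hmp : m + 1 = 2 ^ (m.log2 + 1) := by omega
        rw [hmp, Nat.log2_two_pow]
      rw [hlog]
      have hzero : ∀ S ∈ List.range' 0 m, ¬ pvBC S = m.log2 + 1 := by
        intro S hS hPS
        rw [List.mem_range'_1] at hS
        have : S = 2 ^ (m.log2 + 1) - 1 := pvBC_eq_of_max (m.log2 + 1) S (by omega) hPS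
        omega
      refine Prod.ext ?_ ?_
      · apply pvDictOf_congr; intro d hd
        simp only [pvCntC]
        rw [hconcat, List.countP_append]
        simp only [List.countP_cons, List.countP_nil]
        by_cases hdK : d = m.log2 + 1
        · subst hdK
          have hz : (List.range' 0 m).countP (fun S => pvBC S == (m.log2 + 1)) = 0 :=
            List.countP_eq_zero.mpr (by intro S hS; simpa using hzero S hS)
          simp [hz, hbc2]
        · have hne2 : (pvBC m == d) = false := by simp; omega
          simp [hdK, hne2]
      · apply pvDictOf_congr; intro d hd
        simp only [pvCntZ]
        rw [hconcat, List.countP_append]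
        simp only [List.countP_cons, List.countP_nil]
        by_cases hdK : d = m.log2 + 1
        · subst hdK
          have hz : (List.range' 0 m).countP (fun S => pvCond anf p S && (pvBC S == (m.log2 + 1))) = 0 :=
            List.countP_eq_zero.mpr (by intro S hS; simp [hzero S hS])
          cases hpc : pvCond anf p m <;> simp [hz, hbc2]
        · have hne2 : (pvBC m == d) = false := by simp; omega
          simp [hdK, hne2]

-- ---- counting by popcount = binomial ----
lemma pv_cnt_choose (n d : Nat) :
    (List.range' 0 (2 ^ n)).countP (fun S => pvBC S == d) = n.choose d := by
  induction n generalizing d with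
  | zero =>
    show List.countP _ [0] = _
    cases d <;> simp [List.countP, List.countP.go, pvBC_zero]
  | succ n ih =>
    have hsplit : List.range' 0 (2 ^ (n + 1)) = List.range' 0 (2 ^ n) ++ List.range' (2 ^ n) (2 ^ n) := by
      have h := @List.range'_append 0 (2 ^ n) (2 ^ n) 1
      simp only [Nat.one_mul, Nat.zero_add] at h
      rw [show (2:Nat) ^ (n + 1) = 2 ^ n + 2 ^ n from by ring, ← h]
    rw [hsplit, List.countP_append]
    have hmap : List.range' (2 ^ n) (2 ^ n) = (List.range' 0 (2 ^ n)).map (fun s => 2 ^ n + s) := by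
      rw [List.range'_eq_map_range, List.range'_eq_map_range]
      simp
    rw [hmap, List.countP_map]
    have hcong : (List.range' 0 (2 ^ n)).countP ((fun S => pvBC S == d) ∘ (fun s => 2 ^ n + s))
        = (List.range' 0 (2 ^ n)).countP (fun S => pvBC S + 1 == d) := by
      apply List.countP_congr
      intro S hS
      rw [List.mem_range'_1] at hS
      simp [Function.comp, pvBC_add_pow n S (by omega)]
    rw [hcong]
    cases d with
    | zero =>
      have hz : (List.range' 0 (2 ^ n)).countP (fun S => pvBC S + 1 == 0) = 0 := by
        apply List.countP_eq_zero.mpr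
        intro S _
        simp
      rw [hz, ih 0]
      simp
    | succ d =>
      have he : (fun S => pvBC S + 1 == d + 1) = (fun S => pvBC S == d) := by
        funext S; simp
      rw [he, ih (d + 1), ih d, Nat.choose_succ_succ]
      simp only [Nat.succ_eq_add_one]
      omega

-- ---- B's binomial-row fold ----
lemma pvB_row (n : Nat) (k : Nat) (hk : k ≤ n + 1) :
    (List.range' 0 k).foldl
      (fun (st : PySem.Dict Int Int × Int) (d : Nat) =>
        (st.1.insert ((d : Nat) : Int) st.2, PySem.Int.floordiv (st.2 * ((n : Int) - ((d : Nat) : Int))) (((d : Nat) : Int) + 1)))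
      (PySem.Dict.empty, 1)
      = (pvDictOf k (fun d => (n.choose d : Int)), (n.choose k : Int)) := by
  induction k with
  | zero => simp [← pvDictOf_zero (fun d => (n.choose d : Int))]
  | succ k ih =>
    have hk' : k ≤ n := by omega
    rw [List.range'_concat, List.foldl_append, ih (by omega)]
    simp only [Nat.zero_add, Nat.one_mul, List.foldl_cons, List.foldl_nil]
    refine Prod.ext ?_ ?_
    · exact pvDictOf_snoc k (fun d => (n.choose d : Int))
    · show PySem.Int.floordiv ((n.choose k : Int) * ((n : Int) - (k : Int))) ((k : Int) + 1)
        = (n.choose (k + 1) : Int)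
      have h1 : (n : Int) - (k : Int) = ((n - k : Nat) : Int) := by
        rw [Int.ofNat_sub hk']
      have h2 : ((k : Int) + 1) = ((k + 1 : Nat) : Int) := by push_cast; ring
      rw [h1, h2, ← Nat.cast_mul, PySem.Int.floordiv_natCast]
      congr 1
      rw [← Nat.choose_succ_right_eq, Nat.mul_div_cancel _ (by omega)]

-- ---- B's zero fill ----
lemma pvB_zeros (k : Nat) :
    (List.range' 0 k).foldl (fun (dn : PySem.Dict Int Int) (d : Nat) => dn.insert ((d : Nat) : Int) 0) PySem.Dict.empty
      = pvDictOf k (fun _ => 0) := by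
  induction k with
  | zero => rfl
  | succ k ih =>
    rw [List.range'_concat, List.foldl_append, ih]
    simpa using pvDictOf_snoc k (fun _ => 0)

-- ---- B's counting pass ----
lemma pvB_pass (anf : List Int) (p : Int) (k : Nat) (L : List Nat) (hL : ∀ s ∈ L, pvBC s < k) (g : Nat → Int) :
    L.foldl
      (fun (dn : PySem.Dict Int Int) (s : Nat) =>
        match PySem.List.pyGet? anf ((s : Nat) : Int) with
        | some v => if PySem.Int.mod v p ≠ 0 then dn.modify ((PySem.Int.bitCount ((s : Nat) : Int) : Nat) : Int) 0 (· + 1) else dn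
        | none => dn)
      (pvDictOf k g)
      = pvDictOf k (fun d => g d + (L.countP (fun S => pvCond anf p S && (pvBC S == d)) : Int)) := by
  induction L generalizing g with
  | nil => simp
  | cons s L ih =>
    have hs : pvBC s < k := hL s (by simp)
    have hL' : ∀ x ∈ L, pvBC x < k := fun x hx => hL x (by simp [hx])
    rw [List.foldl_cons]
    rcases hget : PySem.List.pyGet? anf (s : Int) with _ | v
    · simp only [hget]
      rw [ih hL']
      apply pvDictOf_congr; intro d hd
      have hc : pvCond anf p s = false := by simp [pvCond, hget]
      rw [List.countP_cons, hc]
      push_cast; simp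
    · simp only [hget]
      have hbc : ((PySem.Int.bitCount (s : Int) : Nat) : Int) = ((pvBC s : Nat) : Int) := rfl
      by_cases hv : PySem.Int.mod v p ≠ 0
      · rw [if_pos hv]
        have hcond : pvCond anf p s = true := by simp [pvCond, hget, hv]
        rw [hbc, PySem.Dict.modify, pv_getD_dictOf k g (pvBC s) hs,
          pvDictOf_insert_mem k g (pvBC s) hs, ih hL']
        apply pvDictOf_congr; intro d hd
        rw [List.countP_cons, hcond]
        by_cases hd' : d = pvBC s
        · subst hd'
          simp only [BEq.rfl, Bool.and_true, if_pos rfl]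
          push_cast; ring
        · have hne : (pvBC s == d) = false := by simp; omega
          simp [hd', hne]
      · rw [if_neg hv]
        have hcond : pvCond anf p s = false := by simp [pvCond, hget]; simpa using hv
        rw [ih hL']
        apply pvDictOf_congr; intro d hd
        rw [List.countP_cons, hcond]
        push_cast; simp

-- port A, with its Int range turned into a Nat range and its loop body named
lemma pv_portA_eq (anf : List Int) (p : Int) (n : Nat) :
    compute_degree_distribution anf (n : Int) p =
      (((List.range' 0 (2 ^ n)).foldl (pvStepA anf p) (PySem.Dict.empty, PySem.Dict.empty)).1.items,
       ((List.range' 0 (2 ^ n)).foldl (pvStepA anf p) (PySem.Dict.empty, PySem.Dict.empty)).2.items) := by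
  unfold compute_degree_distribution
  rw [Int.toNat_natCast, show ((2:Int) ^ n) = (((2 ^ n : Nat)) : Int) from by push_cast; ring,
    PySem.List.pyRange_zero_nat, List.range_eq_range', List.foldl_map]
  rfl

-- port B, likewise
lemma pv_portB_eq (anf : List Int) (p : Int) (n : Nat) :
    compute_degree_distribution_alt anf (n : Int) p =
      (((List.range' 0 (n + 1)).foldl
          (fun (st : PySem.Dict Int Int × Int) (d : Nat) =>
            (st.1.insert ((d : Nat) : Int) st.2,
             PySem.Int.floordiv (st.2 * ((n : Int) - ((d : Nat) : Int))) (((d : Nat) : Int) + 1)))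
          (PySem.Dict.empty, 1)).1.items,
       ((List.range' 0 (2 ^ n)).foldl
          (fun (dn : PySem.Dict Int Int) (s : Nat) =>
            match PySem.List.pyGet? anf ((s : Nat) : Int) with
            | some v => if PySem.Int.mod v p ≠ 0 then dn.modify ((PySem.Int.bitCount ((s : Nat) : Int) : Nat) : Int) 0 (· + 1) else dn
            | none => dn)
          ((List.range' 0 (n + 1)).foldl
            (fun (dn : PySem.Dict Int Int) (d : Nat) => dn.insert ((d : Nat) : Int) 0) PySem.Dict.empty)).items) := by
  show (((PySem.List.pyRange 0 ((n : Int) + 1) 1).foldl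
      (fun (st : PySem.Dict Int Int × Int) d =>
        (st.1.insert d st.2, PySem.Int.floordiv (st.2 * ((n : Int) - d)) (d + 1)))
      (PySem.Dict.empty, 1)).1.items,
    ((PySem.List.pyRange 0 ((2:Int) ^ ((n : Int)).toNat) 1).foldl
      (fun (dn : PySem.Dict Int Int) S =>
        match PySem.List.pyGet? anf S with
        | some v => if PySem.Int.mod v p ≠ 0 then dn.modify ((PySem.Int.bitCount S : Nat) : Int) 0 (· + 1) else dn
        | none => dn)
      ((PySem.List.pyRange 0 ((n : Int) + 1) 1).foldl
        (fun (dn : PySem.Dict Int Int) d => dn.insert d 0) PySem.Dict.empty)).items) = _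
  rw [Int.toNat_natCast, show ((2:Int) ^ n) = (((2 ^ n : Nat)) : Int) from by push_cast; ring,
    show ((n : Int) + 1) = ((n + 1 : Nat) : Int) from by push_cast; ring,
    PySem.List.pyRange_zero_nat, PySem.List.pyRange_zero_nat, List.range_eq_range',
    List.range_eq_range', List.foldl_map, List.foldl_map, List.foldl_map]

-- ===== VERDICT (by name: the statement is the Claim_ definition above) =====
theorem compute_degree_distribution_spec : Claim_equal_compute_degree_distribution := by
  intro anf N p _hdom hpre
  obtain ⟨hN, hp, hlen⟩ := hpre
  unfold Spec_compute_degree_distribution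
  lift N to Nat using hN with n
  rw [pv_portA_eq anf p n, pv_portB_eq anf p n]
  rw [pvA_loop anf p (2 ^ n) Nat.one_le_two_pow, Nat.log2_two_pow]
  rw [pvB_row n (n + 1) (le_refl _), pvB_zeros (n + 1)]
  have hL : ∀ s ∈ List.range' 0 (2 ^ n), pvBC s < n + 1 := by
    intro s hs
    rw [List.mem_range'_1] at hs
    exact Nat.lt_succ_of_le (pvBC_le n s (by omega))
  rw [pvB_pass anf p (n + 1) (List.range' 0 (2 ^ n)) hL (fun _ => 0)]
  have h1 : pvDictOf (n + 1) (pvCntC (2 ^ n)) = pvDictOf (n + 1) (fun d => (n.choose d : Int)) := by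
    apply pvDictOf_congr; intro d hd
    simp only [pvCntC, pv_cnt_choose]
  have h2 : pvDictOf (n + 1) (pvCntZ anf p (2 ^ n))
      = pvDictOf (n + 1) (fun d => 0 + (((List.range' 0 (2 ^ n)).countP (fun S => pvCond anf p S && (pvBC S == d)) : Nat) : Int)) := by
    apply pvDictOf_congr; intro d hd
    simp [pvCntZ]
  rw [h1, h2]
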